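-- pv_equiv track=rewrite | github.com/tainenko/Leetcode2019 | leetcode/editor/en/[777]Swap Adjacent in LR String.py | canTransform
-- ===== SOURCE A (Python) =====
-- def canTransform(start: str, end: str) -> bool:
--     idx1 = 0
--     idx2 = 0
--     while idx1 <= len(start) and idx2 <= len(end):
--         while idx1 < len(start):
--             if start[idx1] in ["L", "R"]:
--                 break
--             idx1 += 1
--
--         while idx2 < len(end):
--             if end[idx2] in ["L", "R"]:
--                 break
--             idx2 += 1
--
--         if idx1 == len(start) or idx2 == len(end):
--             break
--
--         if start[idx1] != end[idx2]:
--             return False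
--
--         if start[idx1] == "L" and idx1 < idx2:
--             return False
--         if start[idx1] == "R" and idx1 > idx2:
--             return False
--
--         idx1 += 1
--         idx2 += 1
--     if idx1 < len(start) and start[idx1] in ["L", "R"]:
--         return False
--     if idx2 < len(end) and end[idx2] in ["L", "R"]:
--         return False
--     return True
-- ===== SOURCE B (Python) =====
-- def canTransform(start: str, end: str) -> bool:
--     s = [(c, i) for i, c in enumerate(start) if c in "LR"]
--     e = [(c, i) for i, c in enumerate(end) if c in "LR"]
--     if len(s) != len(e):
--         return False
--     for (c1, i1), (c2, i2) in zip(s, e):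
--         if c1 != c2:
--             return False
--         if c1 == "L" and i1 < i2:
--             return False
--         if c1 == "R" and i1 > i2:
--             return False
--     return True
-- ===== Notes on version B (the rewrite author's own statement) =====
-- stated objective: simpler
-- what changed: Replaces the interleaved two-pointer skip-and-compare while loop with a two-phase extract-then-compare: build the (char, index) lists of L/R characters of each string once via comprehensions, then check equal length and compare aligned pairs over zip.
import Mathlib
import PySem

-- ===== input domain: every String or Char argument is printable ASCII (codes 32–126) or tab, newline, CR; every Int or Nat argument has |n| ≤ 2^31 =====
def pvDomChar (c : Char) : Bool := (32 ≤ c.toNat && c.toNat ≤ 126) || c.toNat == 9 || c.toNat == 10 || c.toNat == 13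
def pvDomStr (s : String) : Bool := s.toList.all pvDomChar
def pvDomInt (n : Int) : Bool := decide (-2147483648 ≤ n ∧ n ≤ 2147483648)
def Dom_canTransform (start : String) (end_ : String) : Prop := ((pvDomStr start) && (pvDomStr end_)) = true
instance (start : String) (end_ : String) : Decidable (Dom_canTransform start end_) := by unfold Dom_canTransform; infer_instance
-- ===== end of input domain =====

-- B replaces A's interleaved two-pointer skip-and-compare while loop by a two-phase
-- extract-then-compare structure (objective: simpler). Both are total; the Python
-- indices are nonnegative ints and are ported as Nat.

-- ===== PORT A =====
-- `c in ["L", "R"]`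
def pvLR (c : Char) : Bool := c = 'L' || c = 'R'

-- inner `while idx < len(s): if s[idx] in ["L","R"]: break; idx += 1` (returns the final idx)
def pvSkip (s : List Char) (i : Nat) : Nat :=
  if i < s.length then
    (if pvLR (s.getD i 'X') then i else pvSkip s (i + 1))
  else i
termination_by s.length - i

-- the two `if`s after the while loop
def pvFinal (s e : List Char) (i1 i2 : Nat) : Bool :=
  if i1 < s.length ∧ pvLR (s.getD i1 'X') then false
  else if i2 < e.length ∧ pvLR (e.getD i2 'X') then false
  else true

theorem pvSkip_ge (s : List Char) (i : Nat) : i ≤ pvSkip s i := by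
  induction i using pvSkip.induct s with
  | case1 i h hc => rw [pvSkip, if_pos h, if_pos hc]
  | case2 i h hc ih => rw [pvSkip, if_pos h, if_neg hc]; omega
  | case3 i h => rw [pvSkip, if_neg h]

theorem pvSkip_le (s : List Char) (i : Nat) (hi : i ≤ s.length) : pvSkip s i ≤ s.length := by
  induction i using pvSkip.induct s with
  | case1 i h hc => rw [pvSkip, if_pos h, if_pos hc]; omega
  | case2 i h hc ih => rw [pvSkip, if_pos h, if_neg hc]; exact ih (by omega)
  | case3 i h => rw [pvSkip, if_neg h]; exact hi

-- the outer `while` loop; idx1/idx2 after the inner loops are pvSkip s i1 / pvSkip e i2,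
-- breaks jump to pvFinal with those values
def pvLoop (s e : List Char) (i1 i2 : Nat) : Bool :=
  if i1 ≤ s.length ∧ i2 ≤ e.length then
    if pvSkip s i1 = s.length ∨ pvSkip e i2 = e.length then
      pvFinal s e (pvSkip s i1) (pvSkip e i2)
    else if s.getD (pvSkip s i1) 'X' ≠ e.getD (pvSkip e i2) 'X' then false
    else if s.getD (pvSkip s i1) 'X' = 'L' ∧ pvSkip s i1 < pvSkip e i2 then false
    else if s.getD (pvSkip s i1) 'X' = 'R' ∧ pvSkip s i1 > pvSkip e i2 then false
    else pvLoop s e (pvSkip s i1 + 1) (pvSkip e i2 + 1)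
  else pvFinal s e i1 i2
termination_by (s.length - i1) + (e.length - i2)
decreasing_by
  have h1 := pvSkip_ge s i1
  have h2 := pvSkip_ge e i2
  have h3 := pvSkip_le s i1 (by omega)
  have h4 := pvSkip_le e i2 (by omega)
  omega

def canTransform (start : String) (end_ : String) : Bool :=
  pvLoop start.toList end_.toList 0 0

-- ===== PORT B =====
-- `[(c, i) for i, c in enumerate(s) if c in "LR"]` (zipIdx pairs are (char, index), like Python's (c, i))
def pvFilt (s : List Char) : List (Char × Nat) :=
  (s.zipIdx 0).filter (fun p => pvLR p.1)

-- the `for ... in zip(s, e)` loop with its early returns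
def pvGo : List ((Char × Nat) × (Char × Nat)) → Bool
  | [] => true
  | ((c1, i1), (c2, i2)) :: rest =>
    if c1 ≠ c2 then false
    else if c1 = 'L' ∧ i1 < i2 then false
    else if c1 = 'R' ∧ i1 > i2 then false
    else pvGo rest

def canTransform_alt (start : String) (end_ : String) : Bool :=
  let s := pvFilt start.toList
  let e := pvFilt end_.toList
  if s.length ≠ e.length then false else pvGo (s.zip e)

-- ===== PRECONDITION & SPEC =====
def Spec_canTransform (start : String) (end_ : String) (out : Bool) : Prop := out = canTransform_alt start end_
instance (start : String) (end_ : String) (out : Bool) : Decidable (Spec_canTransform start end_ out) := by unfold Spec_canTransform; infer_instance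

-- ===== CLAIM (what is proved, stated in full; the proofs are below) =====
def Claim_equal_canTransform : Prop := ∀ (start : String) (end_ : String), Dom_canTransform start end_ → Spec_canTransform start end_ (canTransform start end_)

-- ===== LEMMAS AND PROOFS =====

-- the (char, index) pairs of L/R characters at positions ≥ i
def filtFrom (s : List Char) (i : Nat) : List (Char × Nat) :=
  if i < s.length then
    (if pvLR (s.getD i 'X') then (s.getD i 'X', i) :: filtFrom s (i + 1) else filtFrom s (i + 1))
  else []
termination_by s.length - i

-- pairwise comparison of the two filtered lists, fused with the length check
def check2 : List (Char × Nat) → List (Char × Nat) → Bool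
  | [], [] => true
  | [], _ :: _ => false
  | _ :: _, [] => false
  | (c1, i1) :: r1, (c2, i2) :: r2 =>
    if c1 ≠ c2 then false
    else if c1 = 'L' ∧ i1 < i2 then false
    else if c1 = 'R' ∧ i1 > i2 then false
    else check2 r1 r2

theorem pvSkip_lt_LR (s : List Char) (i : Nat) (h : pvSkip s i < s.length) :
    pvLR (s.getD (pvSkip s i) 'X') = true := by
  induction i using pvSkip.induct s with
  | case1 i hi hc => rw [pvSkip, if_pos hi, if_pos hc]; exact hc
  | case2 i hi hc ih => rw [pvSkip, if_pos hi, if_neg hc] at h ⊢; exact ih h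
  | case3 i hi => rw [pvSkip, if_neg hi] at h; exact absurd h hi

theorem filtFrom_skip (s : List Char) (i : Nat) :
    filtFrom s i =
      (if pvSkip s i < s.length then
        (s.getD (pvSkip s i) 'X', pvSkip s i) :: filtFrom s (pvSkip s i + 1)
      else []) := by
  induction i using pvSkip.induct s with
  | case1 i hi hc =>
    rw [filtFrom, if_pos hi, if_pos hc, pvSkip, if_pos hi, if_pos hc, if_pos hi]
  | case2 i hi hc ih =>
    rw [filtFrom, if_pos hi, if_neg hc, pvSkip, if_pos hi, if_neg hc]; exact ih
  | case3 i hi =>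
    rw [filtFrom, if_neg hi, pvSkip, if_neg hi, if_neg hi]

theorem filtFrom_eq_filter (s : List Char) (i : Nat) :
    filtFrom s i = ((s.drop i).zipIdx i).filter (fun p => pvLR p.1) := by
  induction i using filtFrom.induct s with
  | case1 i hi hc ih =>
    rw [filtFrom, if_pos hi, if_pos hc, List.drop_eq_getElem_cons hi, List.zipIdx_cons,
      List.filter_cons]
    have hg : s.getD i 'X' = s[i] := List.getD_eq_getElem s 'X' hi
    rw [hg] at hc
    simp only [hc, if_pos, ih, hg]
  | case2 i hi hc ih =>
    rw [filtFrom, if_pos hi, if_neg hc, List.drop_eq_getElem_cons hi, List.zipIdx_cons,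
      List.filter_cons]
    have hg : s.getD i 'X' = s[i] := List.getD_eq_getElem s 'X' hi
    rw [hg] at hc
    simp only [Bool.not_eq_true] at hc
    simp only [hc, Bool.false_eq_true, if_false, ih]
  | case3 i hi =>
    rw [filtFrom, if_neg hi, List.drop_eq_nil_of_le (by omega)]
    rfl

theorem filtFrom_zero (s : List Char) : filtFrom s 0 = pvFilt s := by
  rw [filtFrom_eq_filter, pvFilt, List.drop_zero]

theorem check2_len_ne {l1 l2 : List (Char × Nat)} (h : l1.length ≠ l2.length) :
    check2 l1 l2 = false := by
  induction l1 generalizing l2 with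
  | nil => cases l2 with
    | nil => simp at h
    | cons y r2 => rw [check2]
  | cons x r1 ih =>
    cases l2 with
    | nil => obtain ⟨c1, i1⟩ := x; rw [check2]
    | cons y r2 =>
      obtain ⟨c1, i1⟩ := x; obtain ⟨c2, i2⟩ := y
      rw [check2]
      split_ifs <;> first | rfl | exact ih (by simpa using h)

theorem check2_eq_go {l1 l2 : List (Char × Nat)} (h : l1.length = l2.length) :
    check2 l1 l2 = pvGo (l1.zip l2) := by
  induction l1 generalizing l2 with
  | nil =>
    cases l2 with
    | nil => rfl
    | cons y r2 => simp at h
  | cons x r1 ih =>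
    cases l2 with
    | nil => simp at h
    | cons y r2 =>
      obtain ⟨c1, i1⟩ := x; obtain ⟨c2, i2⟩ := y
      rw [check2, List.zip_cons_cons, pvGo]
      split_ifs <;> first | rfl | exact ih (by simpa using h)

theorem loop_eq_check2 (s e : List Char) (i1 i2 : Nat)
    (h1 : i1 ≤ s.length) (h2 : i2 ≤ e.length) :
    pvLoop s e i1 i2 = check2 (filtFrom s i1) (filtFrom e i2) := by
  induction i1, i2 using pvLoop.induct s e with
  | case1 i1 i2 hcond hbrk =>
    rw [pvLoop, if_pos hcond, if_pos hbrk]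
    rw [filtFrom_skip s i1, filtFrom_skip e i2]
    have hj1le := pvSkip_le s i1 h1
    have hj2le := pvSkip_le e i2 h2
    rcases hbrk with hb | hb
    · rw [if_neg (by omega)]
      by_cases h : pvSkip e i2 < e.length
      · rw [if_pos h, check2]
        have hlr := pvSkip_lt_LR e i2 h
        rw [List.getD_eq_getElem e 'X' h] at hlr
        simp [pvFinal, hb, h, hlr]
      · rw [if_neg h, check2]
        simp [pvFinal, hb, h]
    · by_cases h : pvSkip s i1 < s.length
      · rw [if_pos h, if_neg (by omega), check2]
        have hlr := pvSkip_lt_LR s i1 h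
        rw [List.getD_eq_getElem s 'X' h] at hlr
        simp [pvFinal, h, hlr]
      · rw [if_neg h, if_neg (by omega), check2]
        simp [pvFinal, h, hb]
  | case2 i1 i2 hcond hbrk hne =>
    rw [pvLoop, if_pos hcond, if_neg hbrk, if_pos hne]
    have hj1 : pvSkip s i1 < s.length := lt_of_le_of_ne (pvSkip_le s i1 h1) (by tauto)
    have hj2 : pvSkip e i2 < e.length := lt_of_le_of_ne (pvSkip_le e i2 h2) (by tauto)
    rw [filtFrom_skip s i1, filtFrom_skip e i2, if_pos hj1, if_pos hj2, check2, if_pos hne]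
  | case3 i1 i2 hcond hbrk hne hL =>
    rw [pvLoop, if_pos hcond, if_neg hbrk, if_neg hne, if_pos hL]
    have hj1 : pvSkip s i1 < s.length := lt_of_le_of_ne (pvSkip_le s i1 h1) (by tauto)
    have hj2 : pvSkip e i2 < e.length := lt_of_le_of_ne (pvSkip_le e i2 h2) (by tauto)
    rw [filtFrom_skip s i1, filtFrom_skip e i2, if_pos hj1, if_pos hj2, check2,
      if_neg hne, if_pos hL]
  | case4 i1 i2 hcond hbrk hne hL hR =>
    rw [pvLoop, if_pos hcond, if_neg hbrk, if_neg hne, if_neg hL, if_pos hR]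
    have hj1 : pvSkip s i1 < s.length := lt_of_le_of_ne (pvSkip_le s i1 h1) (by tauto)
    have hj2 : pvSkip e i2 < e.length := lt_of_le_of_ne (pvSkip_le e i2 h2) (by tauto)
    rw [filtFrom_skip s i1, filtFrom_skip e i2, if_pos hj1, if_pos hj2, check2,
      if_neg hne, if_neg hL, if_pos hR]
  | case5 i1 i2 hcond hbrk hne hL hR ih =>
    rw [pvLoop, if_pos hcond, if_neg hbrk, if_neg hne, if_neg hL, if_neg hR]
    have hj1 : pvSkip s i1 < s.length := lt_of_le_of_ne (pvSkip_le s i1 h1) (by tauto)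
    have hj2 : pvSkip e i2 < e.length := lt_of_le_of_ne (pvSkip_le e i2 h2) (by tauto)
    rw [filtFrom_skip s i1, filtFrom_skip e i2, if_pos hj1, if_pos hj2, check2,
      if_neg hne, if_neg hL, if_neg hR]
    exact ih (by omega) (by omega)
  | case6 i1 i2 hcond =>
    exact absurd ⟨h1, h2⟩ hcond

-- ===== VERDICT (by name: the statement is the Claim_ definition above) =====
theorem canTransform_spec : Claim_equal_canTransform := by
  intro start end_ _
  unfold Spec_canTransform canTransform canTransform_alt
  rw [loop_eq_check2 _ _ 0 0 (Nat.zero_le _) (Nat.zero_le _), filtFrom_zero, filtFrom_zero]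
  by_cases h : (pvFilt start.toList).length = (pvFilt end_.toList).length
  · simp only [h, ne_eq, not_true_eq_false, if_false]
    simpa using check2_eq_go h
  · simp only [ne_eq, h, not_false_eq_true, if_true]
    exact check2_len_ne h
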